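-- pv_equiv track=rewrite | github.com/ThirdKeyAI/symbiont-orga-demo | scripts/audit-knowledge-stores.py | html_comment_fragments
-- ===== SOURCE A (Python) =====
-- def html_comment_fragments(s: str) -> list[tuple[int, int]]:
--     out = []
--     if not s:
--         return out
--     i = 0
--     while i < len(s):
--         nxt = s.find("<!--", i)
--         if nxt < 0:
--             break
--         # Always a finding — even an unbalanced opener counts.
--         out.append((nxt, -1))  # -1 sentinel = "MARKUP"
--         end = s.find("-->", nxt + 4)
--         i = end + 3 if end >= 0 else len(s)
--     return out
-- ===== SOURCE B (Python) =====
-- def html_comment_fragments(s: str) -> list[tuple[int, int]]: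
--     # Single left-to-right character scan with an inside-comment flag,
--     # instead of repeated find() jumps.
--     out = []
--     inside = False
--     opened = 0
--     for i in range(len(s)):
--         if inside:
--             if i >= opened + 4 and s[i:i + 3] == "-->":
--                 inside = False
--         elif s[i:i + 4] == "<!--":
--             out.append((i, -1))
--             inside = True
--             opened = i
--     return out
-- ===== Notes on version B (the rewrite author's own statement) =====
-- stated objective: alternative
-- what changed: A repeatedly jumps through the string with str.find for the opener and then for the closer; B makes one left-to-right per-index scan carrying an inside-comment flag and the last opener position, with a constant-size window comparison at each index and no find calls.
import Mathlib
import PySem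

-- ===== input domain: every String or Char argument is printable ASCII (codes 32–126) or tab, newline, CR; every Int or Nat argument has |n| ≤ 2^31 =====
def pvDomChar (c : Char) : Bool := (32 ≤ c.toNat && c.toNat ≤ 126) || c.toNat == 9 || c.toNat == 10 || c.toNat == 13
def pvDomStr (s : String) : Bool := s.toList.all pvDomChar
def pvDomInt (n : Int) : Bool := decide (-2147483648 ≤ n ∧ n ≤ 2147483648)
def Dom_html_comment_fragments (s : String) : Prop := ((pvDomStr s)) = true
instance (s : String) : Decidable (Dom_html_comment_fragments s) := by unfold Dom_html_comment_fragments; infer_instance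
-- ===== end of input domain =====

-- B replaces A's repeated find()/skip jumps by a single left-to-right character scan
-- with an inside-comment flag (objective: alternative, same results, similar cost).

-- ===== PORT A =====
-- "<!--" and "-->" as character lists
def pvOpener : List Char := ['<', '!', '-', '-']
def pvCloser : List Char := ['-', '-', '>']

-- the 'while i < len(s)' loop of A: nxt = s.find("<!--", i); append; end = s.find("-->", nxt+4); i = end+3 or len(s)
def pvLoopA (cs : List Char) (i : Nat) (out : List (Int × Int)) : List (Int × Int) :=
  if hlt : i < cs.length then
    let nxt := PySem.Chars.findFrom cs pvOpener (i : Int) none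
    if hn : nxt < 0 then out
    else
      let e := PySem.Chars.findFrom cs pvCloser (nxt + 4) none
      pvLoopA cs (if 0 ≤ e then e + 3 else (cs.length : Int)).toNat (out ++ [(nxt, -1)])
  else out
  termination_by cs.length - i
  decreasing_by
    have hi : i ≤ cs.length := le_of_lt hlt
    have h0 : (0:Int) ≤ PySem.Chars.findFrom cs pvOpener (i : Int) none := not_lt.mp hn
    obtain ⟨h1, h2, h3⟩ := PySem.Chars.findFrom_natCast_spec cs pvOpener i hi (by omega)
    have hlen : (4:Nat) ≤ (cs.drop (PySem.Chars.findFrom cs pvOpener (i : Int) none).toNat).length :=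
      h2.length_le
    rw [List.length_drop] at hlen
    have hj4 : (PySem.Chars.findFrom cs pvOpener (i : Int) none).toNat + 4 ≤ cs.length := by omega
    have hstart : (PySem.Chars.findFrom cs pvOpener (i : Int) none + 4)
        = (((PySem.Chars.findFrom cs pvOpener (i : Int) none).toNat + 4 : Nat) : Int) := by
      push_cast; omega
    split
    · next he =>
        have hne : PySem.Chars.findFrom cs pvCloser
            (PySem.Chars.findFrom cs pvOpener (i : Int) none + 4) none ≠ -1 := by omega
        have hs := PySem.Chars.findFrom_natCast_spec cs pvCloser
          ((PySem.Chars.findFrom cs pvOpener (i : Int) none).toNat + 4) hj4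
          (by rw [← hstart]; exact hne)
        rw [← hstart] at hs
        obtain ⟨he1, -, -⟩ := hs
        omega
    · next he => omega

def html_comment_fragments (s : String) : List (Int × Int) :=
  if s.toList = [] then [] else pvLoopA s.toList 0 []

-- ===== PORT B =====
-- B's 'for i in range(len(s))' state machine: inside flag + position of the last opener
def pvScanB (cs : List Char) (i : Nat) (inside : Bool) (opened : Nat)
    (out : List (Int × Int)) : List (Int × Int) :=
  if i < cs.length then
    if inside then
      if opened + 4 ≤ i ∧ PySem.List.slice cs (some (i : Int)) (some ((i : Int) + 3)) = pvCloser then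
        pvScanB cs (i + 1) false opened out
      else
        pvScanB cs (i + 1) true opened out
    else
      if PySem.List.slice cs (some (i : Int)) (some ((i : Int) + 4)) = pvOpener then
        pvScanB cs (i + 1) true i (out ++ [((i : Int), -1)])
      else
        pvScanB cs (i + 1) false opened out
  else out
  termination_by cs.length - i

def html_comment_fragments_alt (s : String) : List (Int × Int) :=
  pvScanB s.toList 0 false 0 []

-- ===== PRECONDITION & SPEC =====
def Spec_html_comment_fragments (s : String) (out : List (Int × Int)) : Prop := out = html_comment_fragments_alt s
instance (s : String) (out : List (Int × Int)) : Decidable (Spec_html_comment_fragments s out) := by unfold Spec_html_comment_fragments; infer_instance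

-- ===== CLAIM (what is proved, stated in full; the proofs are below) =====
def Claim_equal_html_comment_fragments : Prop := ∀ (s : String), Dom_html_comment_fragments s → Spec_html_comment_fragments s (html_comment_fragments s)

-- ===== LEMMAS AND PROOFS =====

-- a 4-char / 3-char slice equals the pattern iff the pattern is a prefix at that index
theorem pv_slice4_eq_iff (cs : List Char) (i : Nat) :
    PySem.List.slice cs (some (i : Int)) (some ((i : Int) + 4)) = pvOpener ↔ pvOpener <+: cs.drop i := by
  have h4 : ((i : Int) + 4) = ((i : Int) + ((4:Nat) : Int)) := by norm_num
  rw [h4, PySem.List.slice_natCast_add, List.prefix_iff_eq_take,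
    show pvOpener.length = 4 from rfl]
  exact eq_comm

theorem pv_slice3_eq_iff (cs : List Char) (i : Nat) :
    PySem.List.slice cs (some (i : Int)) (some ((i : Int) + 3)) = pvCloser ↔ pvCloser <+: cs.drop i := by
  have h3 : ((i : Int) + 3) = ((i : Int) + ((3:Nat) : Int)) := by norm_num
  rw [h3, PySem.List.slice_natCast_add, List.prefix_iff_eq_take,
    show pvCloser.length = 3 from rfl]
  exact eq_comm

-- a prefix at a later index is an infix of an earlier drop
theorem pv_prefix_drop_infix (cs sub : List Char) (i k : Nat) (hik : i ≤ k)
    (h : sub <+: cs.drop k) : sub <:+: cs.drop i := by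
  have hd : cs.drop k = (cs.drop i).drop (k - i) := by
    rw [List.drop_drop]; congr 1; omega
  rw [hd] at h
  exact h.isInfix.trans (List.drop_suffix _ _).isInfix

-- scanning outside a comment past positions with no opener
theorem pv_scan_out_skip (cs : List Char) (op : Nat) (out : List (Int × Int)) :
    ∀ n i, (∀ k, i ≤ k → k < i + n → ¬ pvOpener <+: cs.drop k) →
      pvScanB cs i false op out = pvScanB cs (i + n) false op out := by
  intro n
  induction n with
  | zero => intro i _; rfl
  | succ n ih =>
    intro i hno
    by_cases hlt : i < cs.length
    · rw [pvScanB]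
      simp only [if_pos hlt, if_neg (Bool.false_ne_true),
        if_neg (fun h => hno i le_rfl (by omega) ((pv_slice4_eq_iff cs i).mp h))]
      rw [ih (i + 1) (fun k hk1 hk2 => hno k (by omega) (by omega))]
      congr 1; omega
    · rw [pvScanB, if_neg hlt, pvScanB, if_neg (by omega)]

-- scanning inside a comment past positions that do not close it
theorem pv_scan_in_skip (cs : List Char) (op : Nat) (out : List (Int × Int)) :
    ∀ n i, (∀ k, i ≤ k → k < i + n → ¬ (op + 4 ≤ k ∧ pvCloser <+: cs.drop k)) →
      pvScanB cs i true op out = pvScanB cs (i + n) true op out := by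
  intro n
  induction n with
  | zero => intro i _; rfl
  | succ n ih =>
    intro i hno
    by_cases hlt : i < cs.length
    · rw [pvScanB]
      simp only [if_pos hlt]
      rw [if_pos trivial]
      rw [if_neg (fun h => hno i le_rfl (by omega) ⟨h.1, (pv_slice3_eq_iff cs i).mp h.2⟩)]
      rw [ih (i + 1) (fun k hk1 hk2 => hno k (by omega) (by omega))]
      congr 1; omega
    · rw [pvScanB, if_neg hlt, pvScanB, if_neg (by omega)]

-- outside a comment with no opener anywhere ahead: the scan returns the accumulator
theorem pv_scan_out_none (cs : List Char) (op : Nat) (out : List (Int × Int)) :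
    ∀ m i, cs.length - i ≤ m → (∀ k, i ≤ k → ¬ pvOpener <+: cs.drop k) →
      pvScanB cs i false op out = out := by
  intro m
  induction m with
  | zero => intro i hm _; rw [pvScanB, if_neg (by omega)]
  | succ m ih =>
    intro i hm hno
    by_cases hlt : i < cs.length
    · rw [pvScanB]
      simp only [if_pos hlt, if_neg (Bool.false_ne_true),
        if_neg (fun h => hno i le_rfl ((pv_slice4_eq_iff cs i).mp h))]
      exact ih (i + 1) (by omega) (fun k hk => hno k (by omega))
    · rw [pvScanB, if_neg hlt]

-- inside a comment that never closes: the scan returns the accumulator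
theorem pv_scan_in_none (cs : List Char) (op : Nat) (out : List (Int × Int)) :
    ∀ m i, cs.length - i ≤ m → (∀ k, ¬ (op + 4 ≤ k ∧ pvCloser <+: cs.drop k)) →
      pvScanB cs i true op out = out := by
  intro m
  induction m with
  | zero => intro i hm _; rw [pvScanB, if_neg (by omega)]
  | succ m ih =>
    intro i hm hno
    by_cases hlt : i < cs.length
    · rw [pvScanB]
      simp only [if_pos hlt]
      rw [if_pos trivial]
      rw [if_neg (fun h => hno i ⟨h.1, (pv_slice3_eq_iff cs i).mp h.2⟩)]
      exact ih (i + 1) (by omega) hno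
    · rw [pvScanB, if_neg hlt]

-- the core correspondence: A's jumping loop equals B's scan in outside mode
theorem pv_main (cs : List Char) :
    ∀ m i op out, cs.length - i ≤ m →
      pvLoopA cs i out = pvScanB cs i false op out := by
  intro m
  induction m with
  | zero =>
    intro i op out hm
    rw [pvLoopA, dif_neg (by omega), pvScanB, if_neg (by omega)]
  | succ m ih =>
    intro i op out hm
    by_cases hlt : i < cs.length
    · have hi : i ≤ cs.length := le_of_lt hlt
      rw [pvLoopA]
      simp only [dif_pos hlt]
      by_cases hn : PySem.Chars.findFrom cs pvOpener (i : Int) none < 0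
      · -- no opener anywhere: A breaks, B scans to the end
        rw [dif_pos hn]
        have hneg : PySem.Chars.findFrom cs pvOpener (i : Int) none = -1 := by
          have hge := PySem.Chars.neg_one_le_find (cs.drop i) pvOpener
          rw [PySem.Chars.findFrom_natCast cs pvOpener i hi] at hn ⊢
          by_cases hf : PySem.Chars.find (cs.drop i) pvOpener = -1
          · rw [if_pos hf]
          · rw [if_neg hf] at hn ⊢; omega
        have hninf : ¬ pvOpener <:+: cs.drop i :=
          (PySem.Chars.findFrom_natCast_eq_neg_one_iff cs pvOpener i hi).mp hneg
        exact (pv_scan_out_none cs op out cs.length i (by omega)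
          (fun k hk hp => hninf (pv_prefix_drop_infix cs pvOpener i k hk hp))).symm
      · rw [dif_neg hn]
        set nxt := PySem.Chars.findFrom cs pvOpener (i : Int) none with hnxt
        have h0 : (0:Int) ≤ nxt := not_lt.mp hn
        obtain ⟨h1, h2, h3⟩ :=
          PySem.Chars.findFrom_natCast_spec cs pvOpener i hi (by omega)
        rw [← hnxt] at h1 h2 h3
        set j := nxt.toNat with hj
        have hjc : ((j : Int)) = nxt := Int.toNat_of_nonneg h0
        have hlen4 : (4:Nat) ≤ (cs.drop j).length := h2.length_le
        rw [List.length_drop] at hlen4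
        have hj4 : j + 4 ≤ cs.length := by omega
        have hij : i ≤ j := by omega
        -- B: skip i..j-1 (no opener there), then match the opener at j
        have hskip1 : pvScanB cs i false op out = pvScanB cs j false op out := by
          have := pv_scan_out_skip cs op out (j - i) i
            (fun k hk1 hk2 => h3 k (by omega) (by omega))
          rwa [Nat.add_sub_cancel' hij] at this
        have hjlt : j < cs.length := by omega
        have hopen : PySem.List.slice cs (some (j : Int)) (some ((j : Int) + 4)) = pvOpener :=
          (pv_slice4_eq_iff cs j).mpr h2
        have hstepj : pvScanB cs j false op out
            = pvScanB cs (j + 1) true j (out ++ [((j : Int), -1)]) := by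
          rw [pvScanB]
          simp only [if_pos hjlt, Bool.false_eq_true, if_neg not_false]
          rw [if_pos hopen]
        set out' := out ++ [((j : Int), -1)] with hout'
        have houtA : out ++ [(nxt, -1)] = out' := by rw [hout', hjc]
        set e := PySem.Chars.findFrom cs pvCloser (nxt + 4) none with he
        have hstart : (nxt + 4) = ((j + 4 : Nat) : Int) := by push_cast; omega
        by_cases hep : (0:Int) ≤ e
        · -- a closer exists: A resumes at e+3; B closes at e and rescans from e+1
          obtain ⟨g1, g2, g3⟩ := by
            have := PySem.Chars.findFrom_natCast_spec cs pvCloser (j + 4) hj4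
              (by rw [← hstart, ← he]; omega)
            rw [← hstart, ← he] at this
            exact this
          set q := e.toNat with hq
          have hqc : ((q : Int)) = e := Int.toNat_of_nonneg hep
          have hlen3 : (3:Nat) ≤ (cs.drop q).length := g2.length_le
          rw [List.length_drop] at hlen3
          have hq3 : q + 3 ≤ cs.length := by omega
          have hjq : j + 4 ≤ q := by omega
          -- A side
          have hia : (if 0 ≤ e then e + 3 else (cs.length : Int)).toNat = q + 3 := by
            rw [if_pos hep]; omega
          rw [hia, houtA]
          -- B side: skip (j+1)..(q-1) inside, close at q, skip q+1,q+2 outside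
          have hskip2 : pvScanB cs (j + 1) true j out' = pvScanB cs q true j out' := by
            have := pv_scan_in_skip cs j out' (q - (j + 1)) (j + 1)
              (fun k hk1 hk2 => by
                intro ⟨hc1, hc2⟩
                exact g3 k (by omega) (by omega) hc2)
            rwa [Nat.add_sub_cancel' (by omega : j + 1 ≤ q)] at this
          have hqlt : q < cs.length := by omega
          have hclose : PySem.List.slice cs (some (q : Int)) (some ((q : Int) + 3)) = pvCloser :=
            (pv_slice3_eq_iff cs q).mpr g2
          have hstepq : pvScanB cs q true j out' = pvScanB cs (q + 1) false j out' := by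
            rw [pvScanB]
            simp only [if_pos hqlt]
            rw [if_pos trivial]
            rw [if_pos ⟨by omega, hclose⟩]
          -- the two positions after a closer cannot start an opener
          obtain ⟨t, ht⟩ := g2
          have hd1 : cs.drop (q + 1) = '-' :: '>' :: t := by
            have : cs.drop (q + 1) = (cs.drop q).drop 1 := by rw [List.drop_drop]
            rw [this, ← ht]; rfl
          have hd2 : cs.drop (q + 2) = '>' :: t := by
            have : cs.drop (q + 2) = (cs.drop q).drop 2 := by rw [List.drop_drop]
            rw [this, ← ht]; rfl
          have hskip3 : pvScanB cs (q + 1) false j out' = pvScanB cs (q + 3) false j out' := by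
            have := pv_scan_out_skip cs j out' 2 (q + 1)
              (fun k hk1 hk2 hp => by
                rcases (by omega : k = q + 1 ∨ k = q + 2) with hk | hk
                · rw [hk, hd1] at hp
                  obtain ⟨u, hu⟩ := hp
                  simp [pvOpener] at hu
                · rw [hk, hd2] at hp
                  obtain ⟨u, hu⟩ := hp
                  simp [pvOpener] at hu)
            simpa using this
          rw [hskip1, hstepj, hskip2, hstepq, hskip3]
          exact ih (q + 3) j out' (by omega)
        · -- no closer: A jumps to len and stops; B stays inside to the end
          have hia : (if 0 ≤ e then e + 3 else (cs.length : Int)).toNat = cs.length := by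
            rw [if_neg hep]; omega
          rw [hia, houtA, pvLoopA, dif_neg (by omega)]
          have heneg : e = -1 := by
            rw [he, hstart, PySem.Chars.findFrom_natCast cs pvCloser (j + 4) hj4] at hep ⊢
            rw [hstart, PySem.Chars.findFrom_natCast cs pvCloser (j + 4) hj4] at he
            have := PySem.Chars.neg_one_le_find (cs.drop (j + 4)) pvCloser
            split at hep
            · simp_all
            · omega
          have hninf : ¬ pvCloser <:+: cs.drop (j + 4) := by
            have := (PySem.Chars.findFrom_natCast_eq_neg_one_iff cs pvCloser (j + 4) hj4)
            rw [← hstart, ← he] at this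
            exact this.mp heneg
          rw [hskip1, hstepj]
          exact (pv_scan_in_none cs j out' cs.length (j + 1) (by omega)
            (fun k ⟨hk1, hk2⟩ => hninf (pv_prefix_drop_infix cs pvCloser (j + 4) k hk1 hk2))).symm
    · rw [pvLoopA, dif_neg hlt, pvScanB, if_neg hlt]

-- ===== VERDICT (by name: the statement is the Claim_ definition above) =====
theorem html_comment_fragments_spec : Claim_equal_html_comment_fragments := by
  intro s _
  unfold Spec_html_comment_fragments html_comment_fragments html_comment_fragments_alt
  by_cases hs : s.toList = []
  · rw [if_pos hs, hs, pvScanB]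
    simp
  · rw [if_neg hs]
    exact pv_main s.toList s.toList.length 0 0 [] (by omega)
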